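-- pv_equiv track=rewrite | github.com/Shreyansh-023/GRIN-backend | attribute_interpreter_v2.py | group_attributes
-- ===== SOURCE A (Python) =====
-- def group_attributes(model_output):
--     """Group related attributes together for better summary generation."""
--     groups = {
--         'image_quality': ['image_id', 'blurry_image'],
--         'facial_features': ['attractive', 'sharp_jawline', 'high_cheekbones', 'big_eyes', 'big_lips', 'sharp_nose', 'double chin'],
--         'skin_condition': ['clear_skin', 'dark_circles', 'oily_skin'],
--         'hair_features': ['bald', 'receeding_hairline', 'long_hair', 'curly_hair', 'grey_hair', 'black_hair'],
--         'facial_hair': ['has_beard', 'patchy_beard', 'has_mustache'],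
--         'grooming': ['well_groomed', 'has_makeup', 'wearing_glasses', 'wearing_hat', 'thick_eyebrow'],
--         'expression': ['smiling', 'mouth_open'],
--         'demographics': ['adult', 'old', 'male', 'veil']
--     }
--
--     grouped_results = {}
--     for group_name, attrs in groups.items():
--         group_values = {attr: model_output.get(attr) for attr in attrs if attr in model_output}
--         if group_values:
--             grouped_results[group_name] = group_values
--     return grouped_results
-- ===== SOURCE B (Python) =====
-- # fixed table: (group name, its attributes in canonical order)
-- _GROUP_TABLE = [
--     ('image_quality', ['image_id', 'blurry_image']),
--     ('facial_features', ['attractive', 'sharp_jawline', 'high_cheekbones', 'big_eyes', 'big_lips', 'sharp_nose', 'double chin']),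
--     ('skin_condition', ['clear_skin', 'dark_circles', 'oily_skin']),
--     ('hair_features', ['bald', 'receeding_hairline', 'long_hair', 'curly_hair', 'grey_hair', 'black_hair']),
--     ('facial_hair', ['has_beard', 'patchy_beard', 'has_mustache']),
--     ('grooming', ['well_groomed', 'has_makeup', 'wearing_glasses', 'wearing_hat', 'thick_eyebrow']),
--     ('expression', ['smiling', 'mouth_open']),
--     ('demographics', ['adult', 'old', 'male', 'veil']),
-- ]
--
-- # reverse index: attribute -> (its group, its position inside that group's attribute list)
-- ATTR_POS = {attr: (group, i)
--             for group, attrs in _GROUP_TABLE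
--             for i, attr in enumerate(attrs)}
--
-- def group_attributes(model_output):
--     """Group related attributes together for better summary generation."""
--     tagged = [(ATTR_POS[key][0], (ATTR_POS[key][1], key, value))
--               for key, value in model_output.items() if key in ATTR_POS]
--     buckets = {}
--     for group, item in tagged:
--         buckets[group] = buckets.get(group, []) + [item]
--     result = {}
--     for group, _ in _GROUP_TABLE:
--         items = buckets.get(group, [])
--         if items:
--             result[group] = {key: value for _, key, value in sorted(items, key=lambda t: t[0])}
--     return result
-- ===== Notes on version B (the rewrite author's own statement) =====
-- stated objective: alternative
-- what changed: Inverts the iteration: a precomputed attribute->(group,position) index tags each model_output item in a single pass, items are bucketed by group and each bucket is ordered by its stored position, instead of scanning the fixed group table and probing model_output for every predefined attribute.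
import Mathlib
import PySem

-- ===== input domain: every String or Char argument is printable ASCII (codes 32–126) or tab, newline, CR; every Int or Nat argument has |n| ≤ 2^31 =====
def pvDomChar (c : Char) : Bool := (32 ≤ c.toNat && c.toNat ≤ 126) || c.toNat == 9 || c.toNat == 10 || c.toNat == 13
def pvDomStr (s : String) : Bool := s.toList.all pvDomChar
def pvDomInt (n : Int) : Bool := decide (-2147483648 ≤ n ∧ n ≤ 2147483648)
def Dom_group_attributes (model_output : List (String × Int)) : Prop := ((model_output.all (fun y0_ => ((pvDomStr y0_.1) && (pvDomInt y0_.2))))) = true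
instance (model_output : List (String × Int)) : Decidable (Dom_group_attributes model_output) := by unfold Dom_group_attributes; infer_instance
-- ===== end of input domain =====

-- B replaces A's scan of the fixed group table (probing the input per predefined attribute) by a single
-- tagged pass over the input with a precomputed attribute->(group,position) index; alternative structure, no speed claim.


-- ===== PORT A =====
-- the fixed groups table: the same literal appears in both Python sources (A inline, B at module level)
def pvGroups : List (String × List String) := [
  ("image_quality", ["image_id", "blurry_image"]),
  ("facial_features", ["attractive", "sharp_jawline", "high_cheekbones", "big_eyes", "big_lips", "sharp_nose", "double chin"]),
  ("skin_condition", ["clear_skin", "dark_circles", "oily_skin"]),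
  ("hair_features", ["bald", "receeding_hairline", "long_hair", "curly_hair", "grey_hair", "black_hair"]),
  ("facial_hair", ["has_beard", "patchy_beard", "has_mustache"]),
  ("grooming", ["well_groomed", "has_makeup", "wearing_glasses", "wearing_hat", "thick_eyebrow"]),
  ("expression", ["smiling", "mouth_open"]),
  ("demographics", ["adult", "old", "male", "veil"])]

def group_attributes (model_output : List (String × Int)) : List (String × List (String × Int)) :=
  pvGroups.foldl (fun grouped_results gi =>
    let group_values := gi.2.foldl (fun gv attr =>
      match List.lookup attr model_output with
      | some v => gv ++ [(attr, v)]
      | none => gv) []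
    if group_values ≠ [] then grouped_results ++ [(gi.1, group_values)] else grouped_results) []

-- ===== PORT B =====
-- ATTR_POS = {attr: (group, i) for group, attrs in GROUPS.items() for i, attr in enumerate(attrs)}
def pvAttrPos : PySem.Dict String (String × Int) :=
  PySem.Dict.ofList (pvGroups.flatMap (fun gi =>
    (PySem.List.enumerate gi.2).map (fun p => (p.2, (gi.1, p.1)))))

def group_attributes_alt (model_output : List (String × Int)) : List (String × List (String × Int)) :=
  let tagged := (model_output.filter (fun kv => pvAttrPos.contains kv.1)).map
    (fun kv => ((pvAttrPos.getD kv.1 ("", 0)).1, ((pvAttrPos.getD kv.1 ("", 0)).2, kv.1, kv.2)))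
  let buckets := tagged.foldl (fun d p => d.modify p.1 [] (· ++ [p.2])) PySem.Dict.empty
  pvGroups.foldl (fun result gi =>
    let items := buckets.getD gi.1 []
    if items ≠ [] then
      result ++ [(gi.1, (PySem.List.sorted items (fun t => t.1) false).map (fun t => (t.2.1, t.2.2)))]
    else result) []

-- ===== PRECONDITION & SPEC =====
-- Pre_ excludes association lists with duplicate keys: they do not represent a Python dict (A's parameter is a
-- dict, which cannot carry duplicate keys), so A's behaviour there is not defined by the Python at all.
def Pre_group_attributes (model_output : List (String × Int)) : Prop :=
  (model_output.map Prod.fst).Nodup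
instance (model_output : List (String × Int)) : Decidable (Pre_group_attributes model_output) := by
  unfold Pre_group_attributes; infer_instance

def pvWitness_group_attributes : (List (String × Int)) := [("smiling", 1), ("male", 0), ("foo", -3)]

def Spec_group_attributes (model_output : List (String × Int)) (out : List (String × List (String × Int))) : Prop := out = group_attributes_alt model_output
instance (model_output : List (String × Int)) (out : List (String × List (String × Int))) : Decidable (Spec_group_attributes model_output out) := by unfold Spec_group_attributes; infer_instance

-- ===== CLAIM (what is proved, stated in full; the proofs are below) =====
def Claim_equal_group_attributes : Prop := ∀ (model_output : List (String × Int)), Dom_group_attributes model_output → Pre_group_attributes model_output → Spec_group_attributes model_output (group_attributes model_output)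

-- ===== LEMMAS AND PROOFS =====

-- the tagged list and the per-group bucket of B, as standalone expressions
def pvTagged (mo : List (String × Int)) : List (String × (Int × String × Int)) :=
  (mo.filter (fun kv => pvAttrPos.contains kv.1)).map
    (fun kv => ((pvAttrPos.getD kv.1 ("", 0)).1, ((pvAttrPos.getD kv.1 ("", 0)).2, kv.1, kv.2)))

def pvBucket (mo : List (String × Int)) (g : String) : List (Int × String × Int) :=
  ((pvTagged mo).filter (fun p => p.1 == g)).map (·.2)

-- the list A's inner loop produces, decorated with the enumerate index
def pvYs (mo : List (String × Int)) (attrs : List String) : List (Int × String × Int) :=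
  (PySem.List.enumerate attrs).filterMap
    (fun p => (List.lookup p.2 mo).map (fun v => (p.1, p.2, v)))

-- finite facts about the literal index (by decide)
lemma pv_pos_of_enum : ∀ gi ∈ pvGroups, ∀ p ∈ PySem.List.enumerate gi.2,
    pvAttrPos.get? p.2 = some (gi.1, p.1) := by decide

lemma pv_items_back : ∀ q ∈ pvAttrPos.items, ∃ gi ∈ pvGroups,
    q.2.1 = gi.1 ∧ (q.2.2, q.1) ∈ PySem.List.enumerate gi.2 := by decide

lemma pv_groups_uniq : ∀ gi ∈ pvGroups, ∀ gj ∈ pvGroups, gi.1 = gj.1 → gi = gj := by decide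

-- A's inner fold in closed form
lemma pv_foldA (mo : List (String × Int)) :
    ∀ (attrs : List String) (acc : List (String × Int)),
    attrs.foldl (fun gv attr =>
      match List.lookup attr mo with
      | some v => gv ++ [(attr, v)]
      | none => gv) acc
    = acc ++ attrs.filterMap (fun a => (List.lookup a mo).map (fun v => (a, v))) := by
  intro attrs
  induction attrs with
  | nil => intro acc; simp
  | cons a l ih =>
    intro acc
    cases h : List.lookup a mo with
    | none => simp [h, ih]
    | some v => simp [h, ih]

-- dropping the index from pvYs gives A's inner list
lemma pv_ys_drop (mo : List (String × Int)) (attrs : List String) :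
    (pvYs mo attrs).map (fun t => (t.2.1, t.2.2))
    = attrs.filterMap (fun a => (List.lookup a mo).map (fun v => (a, v))) := by
  have aux : ∀ (el : List String) (s : Int),
      ((PySem.List.enumerate el s).filterMap
        (fun p => (List.lookup p.2 mo).map (fun v => (p.1, p.2, v)))).map (fun t => (t.2.1, t.2.2))
      = el.filterMap (fun a => (List.lookup a mo).map (fun v => (a, v))) := by
    intro el
    induction el with
    | nil => intro s; simp [PySem.List.enumerate]
    | cons a l ih =>
      intro s
      rw [PySem.List.enumerate_cons]
      cases h : List.lookup a mo with
      | none => simp [h, ih]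
      | some v => simp [h, ih]
  exact aux attrs 0

-- membership under a Nodup key list: lookup agrees with membership
lemma pv_mem_lookup (mo : List (String × Int)) (hnd : (mo.map Prod.fst).Nodup)
    (k : String) (v : Int) : (k, v) ∈ mo ↔ List.lookup k mo = some v := by
  induction mo with
  | nil => simp
  | cons kv l ih =>
    obtain ⟨k0, v0⟩ := kv
    simp only [List.map_cons, List.nodup_cons] at hnd
    by_cases hk : k = k0
    · subst hk
      simp only [List.lookup_cons, beq_self_eq_true, List.mem_cons]
      constructor
      · rintro (h | h)
        · simpa using (congrArg Prod.snd h).symm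
        · exact absurd (List.mem_map_of_mem (f := Prod.fst) h) (by simpa using hnd.1)
      · rintro h
        left
        simpa using congrArg (fun x => ((k : String), x)) (Option.some.inj h).symm
    · have hb : (k == k0) = false := by simpa using hk
      simp [List.lookup_cons, hb, hk, ih hnd.2]

lemma pv_mem_bucket (mo : List (String × Int)) (g : String) (t : Int × String × Int) :
    t ∈ pvBucket mo g ↔ (t.2.1, t.2.2) ∈ mo ∧ pvAttrPos.get? t.2.1 = some (g, t.1) := by
  obtain ⟨i, k, v⟩ := t
  unfold pvBucket pvTagged
  simp only [List.mem_map, List.mem_filter]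
  constructor
  · rintro ⟨p, ⟨⟨kv, ⟨hmem, hc⟩, rfl⟩, hg⟩, hsnd⟩
    simp only at hg hsnd
    rw [PySem.Dict.contains_eq_isSome_get?] at hc
    obtain ⟨gv, hgv⟩ := Option.isSome_iff_exists.mp hc
    rw [PySem.Dict.getD_of_get?_eq_some _ _ hgv] at hg hsnd
    obtain ⟨rfl, rfl, rfl⟩ := Prod.mk.injEq .. ▸ (by exact hsnd : (gv.2, kv.1, kv.2) = (i, k, v))
    refine ⟨hmem, ?_⟩
    rw [hgv]
    have : gv.1 = g := by simpa using hg
    rw [← this]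
  · rintro ⟨hmem, hget⟩
    refine ⟨((pvAttrPos.getD k ("", 0)).1, ((pvAttrPos.getD k ("", 0)).2, k, v)),
      ⟨⟨(k, v), ⟨hmem, ?_⟩, rfl⟩, ?_⟩, ?_⟩
    · rw [PySem.Dict.contains_eq_isSome_get?, hget]; rfl
    · simp [PySem.Dict.getD_of_get?_eq_some _ _ hget]
    · simp [PySem.Dict.getD_of_get?_eq_some _ _ hget]

lemma pv_mem_ys (mo : List (String × Int)) (gi : String × List String) (hgi : gi ∈ pvGroups)
    (t : Int × String × Int) :
    t ∈ pvYs mo gi.2 ↔ List.lookup t.2.1 mo = some t.2.2 ∧ pvAttrPos.get? t.2.1 = some (gi.1, t.1) := by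
  obtain ⟨i, k, v⟩ := t
  unfold pvYs
  simp only [List.mem_filterMap, Option.map_eq_some_iff]
  constructor
  · rintro ⟨p, hp, v', hv', heq⟩
    obtain ⟨rfl, rfl, rfl⟩ := Prod.mk.injEq .. ▸ (by exact heq : (p.1, p.2, v') = (i, k, v))
    exact ⟨hv', pv_pos_of_enum gi hgi p hp⟩
  · rintro ⟨hlk, hget⟩
    have hitem := PySem.Dict.mem_items_of_get?_eq_some _ hget
    obtain ⟨gi', hgi', h1, h2⟩ := pv_items_back _ hitem
    have : gi' = gi := pv_groups_uniq gi' hgi' gi hgi (by simpa using h1.symm)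
    subst this
    exact ⟨(i, k), h2, v, hlk, rfl⟩

lemma pv_ys_pairwise (mo : List (String × Int)) (attrs : List String) :
    (pvYs mo attrs).Pairwise (fun a b => a.1 < b.1) := by
  unfold pvYs
  refine List.Pairwise.filterMap _ ?_ (PySem.List.pairwise_lt_enumerate attrs 0)
  intro a a' hlt b hb b' hb'
  cases h : List.lookup a.2 mo with
  | none => rw [h] at hb; simp at hb
  | some v =>
    rw [h] at hb
    simp only [Option.map_some, Option.some.injEq] at hb
    cases h' : List.lookup a'.2 mo with
    | none => rw [h'] at hb'; simp at hb'
    | some v' =>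
      rw [h'] at hb'
      simp only [Option.map_some, Option.some.injEq] at hb'
      rw [← hb, ← hb']
      exact hlt

lemma pv_bucket_nodup (mo : List (String × Int)) (hnd : (mo.map Prod.fst).Nodup) (g : String) :
    (pvBucket mo g).Nodup := by
  unfold pvBucket pvTagged
  rw [List.filter_map, List.map_map]
  apply List.Nodup.map
  · rintro ⟨a1, a2⟩ ⟨b1, b2⟩ h
    simp only [Function.comp_apply] at h
    have h1 : a1 = b1 := congrArg (fun t => t.2.1) h
    have h2 : a2 = b2 := congrArg (fun t => t.2.2) h
    simp [h1, h2]
  · exact ((hnd.of_map).filter _).filter _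

lemma pv_sorted_bucket (mo : List (String × Int)) (hnd : (mo.map Prod.fst).Nodup)
    (gi : String × List String) (hgi : gi ∈ pvGroups) :
    PySem.List.sorted (pvBucket mo gi.1) (fun t => t.1) false = pvYs mo gi.2 := by
  apply PySem.List.sorted_eq_of_perm_of_pairwise_lt
  · rw [List.perm_ext_iff_of_nodup ?_ (pv_bucket_nodup mo hnd gi.1)]
    · intro t
      rw [pv_mem_ys mo gi hgi t, pv_mem_bucket mo gi.1 t, pv_mem_lookup mo hnd]
    · exact (pv_ys_pairwise mo gi.2).imp (fun h => by rintro rfl; exact lt_irrefl _ h)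
  · exact pv_ys_pairwise mo gi.2

lemma pv_bucket_fold (mo : List (String × Int)) (g : String) :
    ((pvTagged mo).foldl (fun d p => d.modify p.1 [] (· ++ [p.2])) PySem.Dict.empty).getD g []
    = pvBucket mo g := by
  unfold pvBucket
  rw [PySem.Dict.getD_foldl_modify_append]
  simp [PySem.Dict.getD_empty]

-- ===== VERDICT (by name: the statement is the Claim_ definition above) =====
theorem group_attributes_spec : Claim_equal_group_attributes := by
  intro mo _hdom hnd
  have hnd' : (mo.map Prod.fst).Nodup := hnd
  show group_attributes mo = group_attributes_alt mo
  have hA : group_attributes mo = pvGroups.foldl (fun acc gi =>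
      if pvYs mo gi.2 ≠ [] then acc ++ [(gi.1, (pvYs mo gi.2).map (fun t => (t.2.1, t.2.2)))] else acc) [] := by
    unfold group_attributes
    apply PySem.List.foldl_congr_mem'
    intro gi hgi acc
    dsimp only
    rw [pv_foldA mo gi.2 [], List.nil_append, ← pv_ys_drop mo gi.2]
    by_cases h : pvYs mo gi.2 = [] <;> simp [h]
  have h0 : group_attributes_alt mo = pvGroups.foldl (fun result gi =>
      let items := ((pvTagged mo).foldl (fun d p => d.modify p.1 [] (· ++ [p.2])) PySem.Dict.empty).getD gi.1 []
      if items ≠ [] then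
        result ++ [(gi.1, (PySem.List.sorted items (fun t => t.1) false).map (fun t => (t.2.1, t.2.2)))]
      else result) [] := rfl
  have hB : group_attributes_alt mo = pvGroups.foldl (fun acc gi =>
      if pvYs mo gi.2 ≠ [] then acc ++ [(gi.1, (pvYs mo gi.2).map (fun t => (t.2.1, t.2.2)))] else acc) [] := by
    rw [h0]
    apply PySem.List.foldl_congr_mem'
    intro gi hgi acc
    dsimp only
    rw [pv_bucket_fold mo gi.1, pv_sorted_bucket mo hnd' gi hgi]
    have hlen : pvBucket mo gi.1 = [] ↔ pvYs mo gi.2 = [] := by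
      rw [← pv_sorted_bucket mo hnd' gi hgi, PySem.List.sorted_eq_nil_iff]
    simp only [ne_eq]
    simp only [hlen]
  rw [hA, hB]
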